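-- pv_equiv track=rewrite | github.com/GeorgeKovshov/codewars2 | codewars9.py | alphabet_war2
-- ===== SOURCE A (Python) =====
-- def alphabet_war2(fight):
--     dict = {
--         'w': 4,
--         'p': 3,
--         'b': 2,
--         's': 1,
--         'm': -4,
--         'q': -3,
--         'd': -2,
--         'z': -1,
--     }
--     length = len(fight)
--     arr = list(fight)
--     for i in range(length):
--         if fight[i] == '*':
--             if i < length - 1:
--                 arr[i + 1] = '_'
--             if i > 0:
--                 arr[i - 1] = '_'
--     result = 0
--     for fighter in arr:
--         if fighter in dict:
--             result += dict[fighter]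
--
--     if result > 0:
--         return "Left side wins!"
--     elif result < 0:
--         return "Right side wins!"
--     else:
--         return "Let's fight again!"
-- ===== SOURCE B (Python) =====
-- def alphabet_war2(fight):
--     values = {
--         'w': 4,
--         'p': 3,
--         'b': 2,
--         's': 1,
--         'm': -4,
--         'q': -3,
--         'd': -2,
--         'z': -1,
--     }
--     padded = ' ' + fight + ' '
--     total = sum(values.get(c, 0)
--                 for left, c, right in zip(padded, fight, padded[2:])
--                 if left != '*' and right != '*')
--     if total > 0:
--         return "Left side wins!"
--     if total < 0:
--         return "Right side wins!"
--     return "Let's fight again!"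
-- ===== Notes on version B (the rewrite author's own statement) =====
-- stated objective: idiomatic
-- what changed: B drops A's mutable marked-copy array and its two index loops: it zips the string with a space-padded copy shifted left and right, summing a fighter's score directly when neither neighbouring character is a bomb.
import Mathlib
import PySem

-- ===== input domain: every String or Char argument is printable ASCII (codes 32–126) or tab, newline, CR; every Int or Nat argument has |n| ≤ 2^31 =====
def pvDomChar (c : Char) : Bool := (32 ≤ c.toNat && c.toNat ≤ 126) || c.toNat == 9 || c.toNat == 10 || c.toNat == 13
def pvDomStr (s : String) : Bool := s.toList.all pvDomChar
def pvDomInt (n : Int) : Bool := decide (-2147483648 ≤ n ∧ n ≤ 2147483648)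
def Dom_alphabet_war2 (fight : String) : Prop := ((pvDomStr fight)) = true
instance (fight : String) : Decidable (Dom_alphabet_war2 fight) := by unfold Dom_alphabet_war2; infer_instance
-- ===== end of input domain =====

-- B drops A's mutable marked-copy array and its two index loops: it zips the string with a
-- space-padded copy shifted left and right and sums a fighter's score directly when neither
-- neighbouring character is a bomb (objective: idiomatic).

-- ===== PORT A =====
-- A's score dictionary
def warDictA : PySem.Dict Char Int :=
  PySem.Dict.ofList [('w', 4), ('p', 3), ('b', 2), ('s', 1), ('m', -4), ('q', -3), ('d', -2), ('z', -1)]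

-- the body of A's marking loop: if fight[i] == '*', blank arr[i+1] and arr[i-1]
-- (fight[i] is always in range here, so pyGetD with a dummy default is exact)
def warMarkStep (l : List Char) (n : Int) (arr : List Char) (i : Int) : List Char :=
  if PySem.List.pyGetD l i ' ' = '*' then
    let arr1 := if i < n - 1 then arr.set (i + 1).toNat '_' else arr
    if i > 0 then arr1.set (i - 1).toNat '_' else arr1
  else arr

def alphabet_war2 (fight : String) : String :=
  let length : Int := PySem.Str.len fight
  let l := fight.toList
  let arr := (PySem.List.pyRange 0 length 1).foldl (warMarkStep l length) l
  let result := arr.foldl (fun r c => if warDictA.contains c then r + warDictA.getD c 0 else r) 0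
  if result > 0 then "Left side wins!"
  else if result < 0 then "Right side wins!"
  else "Let's fight again!"

-- ===== PORT B =====
-- B's score dictionary (values.get(c, 0) = Dict.getD)
def warValuesB : PySem.Dict Char Int :=
  PySem.Dict.ofList [('w', 4), ('p', 3), ('b', 2), ('s', 1), ('m', -4), ('q', -3), ('d', -2), ('z', -1)]

def alphabet_war2_alt (fight : String) : String :=
  let l := fight.toList
  let padded := ' ' :: l ++ [' ']                       -- ' ' + fight + ' '
  -- zip(padded, fight, padded[2:]); the guarded generator sum is a fold
  let total : Int := ((padded.zip l).zip (padded.drop 2)).foldl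
    (fun r t => if t.1.1 ≠ '*' ∧ t.2 ≠ '*' then r + warValuesB.getD t.1.2 0 else r) 0
  if total > 0 then "Left side wins!"
  else if total < 0 then "Right side wins!"
  else "Let's fight again!"

-- ===== PRECONDITION & SPEC =====
def Spec_alphabet_war2 (fight : String) (out : String) : Prop := out = alphabet_war2_alt fight
instance (fight : String) (out : String) : Decidable (Spec_alphabet_war2 fight out) := by unfold Spec_alphabet_war2; infer_instance

-- ===== CLAIM (what is proved, stated in full; the proofs are below) =====
def Claim_equal_alphabet_war2 : Prop := ∀ (fight : String), Dom_alphabet_war2 fight → Spec_alphabet_war2 fight (alphabet_war2 fight)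

-- ===== LEMMAS AND PROOFS =====

-- j is a (within the first m positions) neighbour of a bomb in l
def warAdj (l : List Char) (m j : ℕ) : Bool :=
  (decide (j + 1 < m) && (l.getD (j + 1) ' ' == '*'))
    || (decide (1 ≤ j) && decide (j - 1 < m) && (l.getD (j - 1) ' ' == '*'))

theorem warAdj_iff (l : List Char) (m j : ℕ) :
    warAdj l m j = true ↔
      ((j + 1 < m ∧ l.getD (j + 1) ' ' = '*') ∨ (1 ≤ j ∧ j - 1 < m ∧ l.getD (j - 1) ' ' = '*')) := by
  simp [warAdj, and_assoc]

-- the intended value of A's arr after processing indices 0..m-1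
def warMarked (l : List Char) (m : ℕ) : List Char :=
  (List.range l.length).map (fun j => if warAdj l m j then '_' else l.getD j ' ')

theorem warMarked_length (l : List Char) (m : ℕ) : (warMarked l m).length = l.length := by
  simp [warMarked]

theorem warMarked_zero (l : List Char) : warMarked l 0 = l := by
  apply List.ext_getElem (by simp [warMarked])
  intro j h1 h2
  simp [warMarked, warAdj, List.getD_eq_getElem?_getD, List.getElem?_eq_getElem h2]

theorem warAdj_succ_iff (l : List Char) (m : ℕ) (hstar : l.getD m ' ' = '*') (j : ℕ) :
    warAdj l (m + 1) j = true ↔ warAdj l m j = true ∨ (1 ≤ m ∧ j = m - 1) ∨ j = m + 1 := by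
  simp only [warAdj_iff]
  constructor
  · rintro (⟨h1, h2⟩ | ⟨h1, h2, h3⟩)
    · rcases Nat.lt_succ_iff_lt_or_eq.mp h1 with h | h
      · exact Or.inl (Or.inl ⟨h, h2⟩)
      · exact Or.inr (Or.inl ⟨by omega, by omega⟩)
    · rcases Nat.lt_succ_iff_lt_or_eq.mp h2 with h | h
      · exact Or.inl (Or.inr ⟨h1, h, h3⟩)
      · exact Or.inr (Or.inr (by omega))
  · rintro ((⟨h1, h2⟩ | ⟨h1, h2, h3⟩) | ⟨h1, h2⟩ | h1)
    · exact Or.inl ⟨by omega, h2⟩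
    · exact Or.inr ⟨h1, by omega, h3⟩
    · exact Or.inl ⟨by omega, by subst h2; simpa [Nat.sub_add_cancel h1] using hstar⟩
    · exact Or.inr ⟨by omega, by omega, by subst h1; simpa using hstar⟩

theorem warMarked_succ (l : List Char) (m : ℕ) (hm : m < l.length) :
    warMarkStep l (l.length : Int) (warMarked l m) (m : Int) = warMarked l (m + 1) := by
  have hlen := warMarked_length l m
  unfold warMarkStep
  rw [PySem.List.pyGetD_natCast]
  by_cases hstar : l.getD m ' ' = '*'
  · have hset1 : ((m : Int) + 1).toNat = m + 1 := by omega
    have hset2 : ((m : Int) - 1).toNat = m - 1 := by omega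
    rw [if_pos hstar]
    have hiff := warAdj_succ_iff l m hstar
    by_cases hp : 1 ≤ m <;> by_cases hl2 : m + 1 < l.length
    -- four branch combinations of A's two in-range guards
    · rw [if_pos (show (m : Int) < (l.length : Int) - 1 by omega),
        if_pos (show (m : Int) > 0 by omega), hset1, hset2]
      apply List.ext_getElem (by simp [warMarked])
      intro j h1 h2
      have hjn : j < l.length := by simpa [warMarked] using h2
      have hA := warMarked_length l m
      have hB := warMarked_length l (m + 1)
      rw [List.getElem_set, List.getElem_set]
      simp only [warMarked, List.getElem_map, List.getElem_range, hiff]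
      split_ifs <;> first | rfl | omega | tauto | (simp_all [not_or]; omega)
    · rw [if_neg (show ¬ (m : Int) < (l.length : Int) - 1 by omega),
        if_pos (show (m : Int) > 0 by omega), hset2]
      apply List.ext_getElem (by simp [warMarked])
      intro j h1 h2
      have hjn : j < l.length := by simpa [warMarked] using h2
      have hA := warMarked_length l m
      have hB := warMarked_length l (m + 1)
      rw [List.getElem_set]
      simp only [warMarked, List.getElem_map, List.getElem_range, hiff]
      split_ifs <;> first | rfl | omega | tauto | (simp_all [not_or]; omega)
    · rw [if_pos (show (m : Int) < (l.length : Int) - 1 by omega),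
        if_neg (show ¬ (m : Int) > 0 by omega), hset1]
      apply List.ext_getElem (by simp [warMarked])
      intro j h1 h2
      have hjn : j < l.length := by simpa [warMarked] using h2
      have hA := warMarked_length l m
      have hB := warMarked_length l (m + 1)
      rw [List.getElem_set]
      simp only [warMarked, List.getElem_map, List.getElem_range, hiff]
      split_ifs <;> first | rfl | omega | tauto | (simp_all [not_or]; omega)
    · rw [if_neg (show ¬ (m : Int) < (l.length : Int) - 1 by omega),
        if_neg (show ¬ (m : Int) > 0 by omega)]
      apply List.ext_getElem (by simp [warMarked])
      intro j h1 h2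
      have hjn : j < l.length := by simpa [warMarked] using h2
      simp only [warMarked, List.getElem_map, List.getElem_range, hiff]
      split_ifs <;> first | rfl | omega | tauto | (simp_all [not_or]; omega)
  · rw [if_neg hstar]
    unfold warMarked
    apply List.map_congr_left
    intro j hj
    have hiff : warAdj l (m + 1) j = true ↔ warAdj l m j = true := by
      simp only [warAdj_iff]
      constructor
      · rintro (⟨h1, h2⟩ | ⟨h1, h2, h3⟩)
        · rcases Nat.lt_succ_iff_lt_or_eq.mp h1 with h | h
          · exact Or.inl ⟨h, h2⟩
          · exact absurd h2 (by rw [h]; exact hstar)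
        · rcases Nat.lt_succ_iff_lt_or_eq.mp h2 with h | h
          · exact Or.inr ⟨h1, h, h3⟩
          · exact absurd h3 (by rw [h]; exact hstar)
      · rintro (⟨h1, h2⟩ | ⟨h1, h2, h3⟩)
        · exact Or.inl ⟨by omega, h2⟩
        · exact Or.inr ⟨h1, by omega, h3⟩
    rw [Bool.eq_iff_iff.mpr hiff]

theorem warMark_fold (l : List Char) (m : ℕ) (hm : m ≤ l.length) :
    (List.range m).foldl (fun arr (k : ℕ) => warMarkStep l (l.length : Int) arr (k : Int)) l = warMarked l m := by
  induction m with
  | zero => simp [warMarked_zero]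
  | succ k ih =>
      rw [List.range_succ, List.foldl_append, ih (by omega)]
      simpa using warMarked_succ l k (by omega)

-- the zipped triples of B written positionally
theorem warZip_eq_range_map (l : List Char) :
    ((((' ' :: l ++ [' ']) : List Char).zip l).zip ((' ' :: l ++ [' ']).drop 2))
      = (List.range l.length).map (fun j =>
          (((' ' :: l ++ [' ']).getD j ' ', l.getD j ' '), (' ' :: l ++ [' ']).getD (j + 2) ' ')) := by
  apply List.ext_getElem
  · simp; omega
  · intro j h1 h2
    have hjn : j < l.length := by simp at h1; omega
    have hp1 : j < (' ' :: l ++ [' ']).length := by simp; omega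
    have hp2 : j + 2 < (' ' :: l ++ [' ']).length := by simp; omega
    have hd : j < ((' ' :: l ++ [' ']).drop 2).length := by simp; omega
    simp only [List.getElem_zip, List.getElem_map, List.getElem_range, List.getElem_drop]
    rw [List.getD_eq_getElem _ _ hp1, List.getD_eq_getElem _ _ hjn, List.getD_eq_getElem _ _ hp2]
    simp [Nat.add_comm 2 j]

-- padded lookups in terms of the original list
theorem warPad_left (l : List Char) (j : ℕ) (hj : j < l.length) :
    (' ' :: l ++ [' ']).getD j ' ' = if j = 0 then ' ' else l.getD (j - 1) ' ' := by
  cases j with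
  | zero => simp
  | succ k =>
      have hk : k < l.length := by omega
      simp [List.getD_eq_getElem?_getD, List.getElem?_append_left hk]

theorem warPad_right (l : List Char) (j : ℕ) (hj : j < l.length) :
    (' ' :: l ++ [' ']).getD (j + 2) ' ' = if j + 1 < l.length then l.getD (j + 1) ' ' else ' ' := by
  have : (' ' :: l ++ [' ']).getD (j + 2) ' ' = (l ++ [' ']).getD (j + 1) ' ' := by
    simp
  rw [this]
  by_cases h : j + 1 < l.length
  · rw [if_pos h]
    simp [List.getD_eq_getElem?_getD, List.getElem?_append_left h]
  · have hj1 : j + 1 = l.length := by omega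
    rw [if_neg h, hj1]
    simp [List.getD_eq_getElem?_getD]

theorem war_result_eq (l : List Char) :
    (warMarked l l.length).foldl (fun r c => if warDictA.contains c then r + warDictA.getD c 0 else r) (0 : Int)
      = ((((' ' :: l ++ [' ']) : List Char).zip l).zip ((' ' :: l ++ [' ']).drop 2)).foldl
          (fun r t => if t.1.1 ≠ '*' ∧ t.2 ≠ '*' then r + warValuesB.getD t.1.2 0 else r) (0 : Int) := by
  rw [warZip_eq_range_map]
  unfold warMarked
  rw [List.foldl_map, List.foldl_map]
  apply PySem.List.foldl_congr_mem
  intro r j hj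
  have hjn : j < l.length := List.mem_range.mp hj
  have hBD : warValuesB = warDictA := rfl
  dsimp only
  rw [warPad_left l j hjn, warPad_right l j hjn, hBD]
  -- the zip guard is ¬ warAdj
  have hguard : ((if j = 0 then ' ' else l.getD (j - 1) ' ') ≠ '*'
      ∧ (if j + 1 < l.length then l.getD (j + 1) ' ' else ' ') ≠ '*') ↔ ¬ (warAdj l l.length j = true) := by
    rw [warAdj_iff]
    constructor
    · rintro ⟨hL, hR⟩ (⟨h1, h2⟩ | ⟨h1, h2, h3⟩)
      · rw [if_pos h1] at hR; exact hR h2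
      · rw [if_neg (by omega)] at hL; exact hL h3
    · intro h
      rw [not_or] at h
      constructor
      · split_ifs with h0
        · decide
        · intro hc; exact h.2 ⟨by omega, by omega, hc⟩
      · split_ifs with h1
        · intro hc; exact h.1 ⟨h1, hc⟩
        · decide
  by_cases hadj : warAdj l l.length j = true
  · rw [if_pos hadj, if_neg (fun h => hguard.mp h hadj),
      if_neg (by decide : ¬ warDictA.contains '_' = true)]
  · rw [if_neg hadj, if_pos (hguard.mpr hadj)]
    by_cases hc : warDictA.contains (l.getD j ' ') = true
    · rw [if_pos hc]
    · have hfalse : warDictA.contains (l.getD j ' ') = false := by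
        revert hc; cases warDictA.contains (l.getD j ' ') <;> simp
      rw [if_neg hc, PySem.Dict.getD_of_not_contains _ _ hfalse, add_zero]

theorem alphabet_war2_eq (fight : String) : alphabet_war2 fight = alphabet_war2_alt fight := by
  have hlen : PySem.Str.len fight = ((fight.toList.length : ℕ) : Int) := by
    simp [PySem.Str.len]
  have hrange : PySem.List.pyRange 0 ((fight.toList.length : ℕ) : Int) 1
      = (List.range fight.toList.length).map (fun (k : ℕ) => (k : Int)) := by
    rw [PySem.List.pyRange_one]
    simp
  simp only [alphabet_war2, alphabet_war2_alt, hlen, hrange, List.foldl_map]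
  rw [warMark_fold fight.toList fight.toList.length le_rfl]
  rw [war_result_eq fight.toList]

-- ===== VERDICT (by name: the statement is the Claim_ definition above) =====
theorem alphabet_war2_spec : Claim_equal_alphabet_war2 := by
  intro fight _
  unfold Spec_alphabet_war2
  exact alphabet_war2_eq fight
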